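-- pv_equiv track=rewrite | github.com/nash911/hunknote | hunknote/styles/inference.py | infer_commit_type
-- ===== SOURCE A (Python) =====
-- from typing import Optional
--
-- def infer_commit_type(staged_files: list[str]) -> Optional[str]:
--     """Infer conventional commit type from staged files.
--
--     Args:
--         staged_files: List of staged file paths.
--
--     Returns:
--         Inferred commit type or None if cannot determine.
--     """
--     if not staged_files:
--         return None
--
--     # Check for docs-only changes
--     doc_extensions = {".md", ".rst", ".txt", ".adoc"}
--     doc_dirs = {"docs", "doc", "documentation"}
--
--     all_docs = all(
--         any(f.endswith(ext) for ext in doc_extensions) or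
--         any(d in f.lower() for d in doc_dirs)
--         for f in staged_files
--     )
--     if all_docs:
--         return "docs"
--
--     # Check for test-only changes
--     test_patterns = {"test_", "_test.", ".test.", "tests/", "test/", "spec/", "__tests__/"}
--     all_tests = all(
--         any(p in f.lower() for p in test_patterns)
--         for f in staged_files
--     )
--     if all_tests:
--         return "test"
--
--     # Check for CI changes (BEFORE build, since CI files often match build patterns)
--     ci_patterns = {".github/workflows/", ".github/workflows", ".gitlab-ci", "Jenkinsfile", ".circleci/", ".travis", ".circleci"}
--     all_ci = all(
--         any(p in f for p in ci_patterns)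
--         for f in staged_files
--     )
--     if all_ci:
--         return "ci"
--
--     # Check for config/build changes (excluding CI files)
--     build_files = {
--         "package.json", "package-lock.json", "yarn.lock", "pnpm-lock.yaml",
--         "pyproject.toml", "poetry.lock", "setup.py", "setup.cfg", "requirements.txt",
--         "Makefile", "CMakeLists.txt", "Cargo.toml", "Cargo.lock",
--         "go.mod", "go.sum", "Gemfile", "Gemfile.lock",
--         "Dockerfile", "docker-compose",
--     }
--     all_build = all(
--         any(bf in f for bf in build_files)
--         for f in staged_files
--     )
--     if all_build:
--         return "build"
--
--     return None
-- ===== SOURCE B (Python) =====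
-- from typing import Optional
--
-- _DOC_EXTS = (".md", ".rst", ".txt", ".adoc")
-- _DOC_DIRS = ("docs", "doc", "documentation")
-- _TEST_PATS = ("test_", "_test.", ".test.", "tests/", "test/", "spec/", "__tests__/")
-- _CI_PATS = (".github/workflows/", ".github/workflows", ".gitlab-ci", "Jenkinsfile",
--             ".circleci/", ".travis", ".circleci")
-- _BUILD_FILES = ("package.json", "package-lock.json", "yarn.lock", "pnpm-lock.yaml",
--                 "pyproject.toml", "poetry.lock", "setup.py", "setup.cfg", "requirements.txt",
--                 "Makefile", "CMakeLists.txt", "Cargo.toml", "Cargo.lock",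
--                 "go.mod", "go.sum", "Gemfile", "Gemfile.lock",
--                 "Dockerfile", "docker-compose")
--
--
-- def infer_commit_type(staged_files: list[str]) -> Optional[str]:
--     """Infer conventional commit type from staged files (single pass over the list)."""
--     if not staged_files:
--         return None
--     docs = tests = ci = build = True
--     for f in staged_files:
--         low = f.lower()
--         docs = docs and (any(f.endswith(e) for e in _DOC_EXTS)
--                          or any(d in low for d in _DOC_DIRS))
--         tests = tests and any(p in low for p in _TEST_PATS)
--         ci = ci and any(p in f for p in _CI_PATS)
--         build = build and any(b in f for b in _BUILD_FILES)
--     for flag, name in ((docs, "docs"), (tests, "test"), (ci, "ci"), (build, "build")):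
--         if flag:
--             return name
--     return None
-- ===== Notes on version B (the rewrite author's own statement) =====
-- stated objective: alternative
-- what changed: A makes up to four separate all()-scans over the whole list (docs, test, ci, build); B makes a single pass maintaining four boolean flags and then returns the first category whose flag survived, in the same priority order.
import Mathlib
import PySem

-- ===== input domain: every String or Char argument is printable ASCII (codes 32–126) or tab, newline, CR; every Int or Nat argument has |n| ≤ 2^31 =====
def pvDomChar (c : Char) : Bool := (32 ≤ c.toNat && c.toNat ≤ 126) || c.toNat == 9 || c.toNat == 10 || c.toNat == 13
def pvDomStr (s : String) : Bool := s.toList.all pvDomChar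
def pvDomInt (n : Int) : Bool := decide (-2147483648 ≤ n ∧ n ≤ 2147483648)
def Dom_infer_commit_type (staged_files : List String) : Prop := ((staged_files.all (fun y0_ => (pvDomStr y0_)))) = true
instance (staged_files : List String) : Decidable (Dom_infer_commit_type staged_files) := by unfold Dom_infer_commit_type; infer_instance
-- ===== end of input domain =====

-- B makes ONE pass over staged_files maintaining four boolean flags, then picks the first
-- category still true, instead of A's four separate all()-scans (objective: alternative).


-- shared literal constants (the same literal sets appear in both Pythons)
def docExtensions : List String := [".md", ".rst", ".txt", ".adoc"]
def docDirs : List String := ["docs", "doc", "documentation"]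
def testPatterns : List String := ["test_", "_test.", ".test.", "tests/", "test/", "spec/", "__tests__/"]
def ciPatterns : List String := [".github/workflows/", ".github/workflows", ".gitlab-ci", "Jenkinsfile", ".circleci/", ".travis", ".circleci"]
def buildFiles : List String :=
  ["package.json", "package-lock.json", "yarn.lock", "pnpm-lock.yaml",
   "pyproject.toml", "poetry.lock", "setup.py", "setup.cfg", "requirements.txt",
   "Makefile", "CMakeLists.txt", "Cargo.toml", "Cargo.lock",
   "go.mod", "go.sum", "Gemfile", "Gemfile.lock",
   "Dockerfile", "docker-compose"]

-- ===== PORT A =====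
def infer_commit_type (staged_files : List String) : Option String :=
  if staged_files = [] then none
  else if staged_files.all (fun f =>
      docExtensions.any (fun ext => PySem.Str.endswith f ext) ||
      docDirs.any (fun d => PySem.Str.isIn d (PySem.Str.lower f))) then some "docs"
  else if staged_files.all (fun f =>
      testPatterns.any (fun p => PySem.Str.isIn p (PySem.Str.lower f))) then some "test"
  else if staged_files.all (fun f =>
      ciPatterns.any (fun p => PySem.Str.isIn p f)) then some "ci"
  else if staged_files.all (fun f =>
      buildFiles.any (fun bf => PySem.Str.isIn bf f)) then some "build"
  else none

-- ===== PORT B =====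
def docsP (f : String) : Bool :=
  let low := PySem.Str.lower f
  docExtensions.any (fun e => PySem.Str.endswith f e) || docDirs.any (fun d => PySem.Str.isIn d low)
def testP (f : String) : Bool := testPatterns.any (fun p => PySem.Str.isIn p (PySem.Str.lower f))
def ciP (f : String) : Bool := ciPatterns.any (fun p => PySem.Str.isIn p f)
def buildP (f : String) : Bool := buildFiles.any (fun b => PySem.Str.isIn b f)

def altStep (s : Bool × Bool × Bool × Bool) (f : String) : Bool × Bool × Bool × Bool :=
  (s.1 && docsP f, s.2.1 && testP f, s.2.2.1 && ciP f, s.2.2.2 && buildP f)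

def firstFlag : List (Bool × String) → Option String
  | [] => none
  | (flag, name) :: rest => if flag then some name else firstFlag rest

def infer_commit_type_alt (staged_files : List String) : Option String :=
  if staged_files = [] then none
  else
    let r := staged_files.foldl altStep (true, true, true, true)
    firstFlag [(r.1, "docs"), (r.2.1, "test"), (r.2.2.1, "ci"), (r.2.2.2, "build")]

-- ===== PRECONDITION & SPEC =====
def Spec_infer_commit_type (staged_files : List String) (out : Option String) : Prop := out = infer_commit_type_alt staged_files
instance (staged_files : List String) (out : Option String) : Decidable (Spec_infer_commit_type staged_files out) := by unfold Spec_infer_commit_type; infer_instance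

-- ===== CLAIM (what is proved, stated in full; the proofs are below) =====
def Claim_equal_infer_commit_type : Prop := ∀ (staged_files : List String), Dom_infer_commit_type staged_files → Spec_infer_commit_type staged_files (infer_commit_type staged_files)

-- ===== LEMMAS AND PROOFS =====

-- the single fold over four flags computes the four all-scans at once
lemma foldl_altStep (l : List String) (a b c d : Bool) :
    l.foldl altStep (a, b, c, d) =
      (a && l.all docsP, b && l.all testP, c && l.all ciP, d && l.all buildP) := by
  induction l generalizing a b c d with
  | nil => simp
  | cons x xs ih =>
      simp only [List.foldl_cons, altStep, List.all_cons, ih, Bool.and_assoc]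

-- ===== VERDICT (by name: the statement is the Claim_ definition above) =====
theorem infer_commit_type_spec : Claim_equal_infer_commit_type := by
  intro staged_files _
  unfold Spec_infer_commit_type infer_commit_type infer_commit_type_alt
  by_cases hnil : staged_files = []
  · simp [hnil]
  · rw [if_neg hnil, if_neg hnil, foldl_altStep]
    show (if staged_files.all docsP then some "docs"
          else if staged_files.all testP then some "test"
          else if staged_files.all ciP then some "ci"
          else if staged_files.all buildP then some "build"
          else none) =
         (if staged_files.all docsP then some "docs"
          else if staged_files.all testP then some "test"
          else if staged_files.all ciP then some "ci"
          else if staged_files.all buildP then some "build"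
          else none)
    rfl
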